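-- pv_equiv track=rewrite | github.com/kvothe9991/DAA | 1117C.Magic_Ship/scripts/magic_ship.py | solve_magic_ship
-- ===== SOURCE A (Python) =====
-- def manhattan(x1, y1, x2, y2):
--     ''' Distancia Manhattan entre dos puntos. '''
--     return abs(x1 - x2) + abs(y1 - y2)
--
-- def binary_search(predicate, low=0, high=10**5):
--     ''' Realiza una búsqueda binaria basada en predicado sobre el intervalo discreto [low, high].
--     Encuentra la primera posición x en que `predicate(x) = True`. '''
--     sol = -1
--
--     while low <= high:
--         mid = (low + high) // 2
--         if predicate(mid):
--             # mid puede ser el primer valor que satisface el predicado.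
--             sol = mid
--             high = mid - 1
--         else:
--             # Se puede descartar el valor mid porque no satisface el predicado.
--             low = mid + 1
--
--     return sol
--
-- def solve_magic_ship(x1, y1, x2, y2, D):
--     ''' Resuelve el problema de Magic Ship utilizando búsqueda binaria. '''
--     d = manhattan(x1, y1, x2, y2)
--     n = len(D)
--
--     # Hallar las sumas parciales de [0,i] para todo i de 0 hasta n.
--     # sums[k] contiene el desplazamiento total en k días.
--     sums = [(0,0)]
--     for dxi, dyi in D:
--         sxi, syi = sums[-1]
--         sums.append((dxi + sxi, dyi + syi))
--
--     # Definir el predicado para la búsqueda binaria.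
--     def predicate(k):
--         xk = x1 + (k//n) * sums[n][0] + sums[k%n][0]
--         yk = y1 + (k//n) * sums[n][1] + sums[k%n][1]
--         return manhattan(xk, yk, x2, y2) <= k
--
--     # Si no hay solución en el máximo posible límite, entonces no puede haber solución.
--     if not predicate(n*d):
--         return -1
--
--     # Buscar el valor mínimo k que satisfaga el predicado.
--     return binary_search(predicate, low=d//2, high=n*d)
-- ===== SOURCE B (Python) =====
-- def solve_magic_ship(x1, y1, x2, y2, D):
--     ''' Magic Ship via recursive first-true binary search over the same predicate. '''
--     d = abs(x1 - x2) + abs(y1 - y2)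
--     n = len(D)
--     sums = _prefixes((0, 0), D)
--
--     def ok(k):
--         xk = x1 + (k // n) * sums[n][0] + sums[k % n][0]
--         yk = y1 + (k // n) * sums[n][1] + sums[k % n][1]
--         return abs(xk - x2) + abs(yk - y2) <= k
--
--     if not ok(n * d):
--         return -1
--     return _search(ok, d // 2, n * d)
--
--
-- def _prefixes(acc, ds):
--     ''' Prefix sums built by structural recursion (scanl), not by append-to-last. '''
--     if not ds:
--         return [acc]
--     dx, dy = ds[0]
--     return [acc] + _prefixes((acc[0] + dx, acc[1] + dy), ds[1:])
--
--
-- def _search(ok, low, high):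
--     ''' First index in [low, high] where ok holds, -1 if none: recursion with fallback,
--     no accumulator variable. '''
--     if low > high:
--         return -1
--     mid = (low + high) // 2
--     if ok(mid):
--         r = _search(ok, low, mid - 1)
--         return mid if r == -1 else r
--     return _search(ok, mid + 1, high)
-- ===== Notes on version B (the rewrite author's own statement) =====
-- stated objective: alternative
-- what changed: The accumulator-based iterative binary search becomes a recursive first-true search with a fallback result, and the prefix-sum list is built by structural recursion (scanl) instead of repeated append-to-last; same predicate and bounds.
-- outside the precondition, e.g. on solve_magic_ship(0, 0, 1, 1, []): A raises ZeroDivisionError, B raises ZeroDivisionError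
import Mathlib
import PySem

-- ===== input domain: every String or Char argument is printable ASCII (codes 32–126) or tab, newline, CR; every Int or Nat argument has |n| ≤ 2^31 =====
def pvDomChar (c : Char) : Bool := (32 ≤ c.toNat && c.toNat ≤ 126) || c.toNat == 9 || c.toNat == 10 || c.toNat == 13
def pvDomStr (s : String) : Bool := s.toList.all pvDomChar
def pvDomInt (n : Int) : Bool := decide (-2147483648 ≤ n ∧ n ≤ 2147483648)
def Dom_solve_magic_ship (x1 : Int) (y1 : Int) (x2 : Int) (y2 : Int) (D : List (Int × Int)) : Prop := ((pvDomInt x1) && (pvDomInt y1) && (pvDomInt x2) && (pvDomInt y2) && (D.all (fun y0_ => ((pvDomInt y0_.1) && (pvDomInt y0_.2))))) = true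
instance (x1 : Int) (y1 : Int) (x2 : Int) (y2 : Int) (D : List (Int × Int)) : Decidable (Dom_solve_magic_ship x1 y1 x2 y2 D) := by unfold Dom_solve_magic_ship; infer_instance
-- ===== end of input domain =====

-- B replaces A's accumulator-based iterative binary search by a recursive first-true search
-- with fallback and builds the prefix sums by structural recursion; same cost ("alternative").

-- ===== PORT A =====
def manhattanA (x1 y1 x2 y2 : Int) : Int := |x1 - x2| + |y1 - y2|

-- sums[-1]; the list is never empty when A reads it, so the IndexError default is unreachable
def pyLastA (s : List (Int × Int)) : Int × Int := (PySem.List.pyGet? s (-1)).getD (0, 0)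

def sumsA (D : List (Int × Int)) : List (Int × Int) :=
  D.foldl (fun s p => s ++ [(p.1 + (pyLastA s).1, p.2 + (pyLastA s).2)]) [(0, 0)]

-- sums[i]; under Pre_ the index is always in range, so the default is unreachable
def pyIdxA (s : List (Int × Int)) (i : Int) : Int × Int := (PySem.List.pyGet? s i).getD (0, 0)

def bsearchA (p : Int → Bool) (low high sol : Int) : Int :=
  if h : low ≤ high then
    let mid := PySem.Int.floordiv (low + high) 2
    if p mid then bsearchA p low (mid - 1) mid else bsearchA p (mid + 1) high sol
  else sol
termination_by (high + 1 - low).toNat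
decreasing_by
  · have := PySem.Int.floordiv_two_mid_bounds h; omega
  · have := PySem.Int.floordiv_two_mid_bounds h; omega

def solve_magic_ship (x1 : Int) (y1 : Int) (x2 : Int) (y2 : Int) (D : List (Int × Int)) : Int :=
  let d := manhattanA x1 y1 x2 y2
  let n : Int := D.length
  let sums := sumsA D
  let predicate : Int → Bool := fun k =>
    let xk := x1 + (PySem.Int.floordiv k n) * (pyIdxA sums n).1 + (pyIdxA sums (PySem.Int.mod k n)).1
    let yk := y1 + (PySem.Int.floordiv k n) * (pyIdxA sums n).2 + (pyIdxA sums (PySem.Int.mod k n)).2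
    decide (manhattanA xk yk x2 y2 ≤ k)
  if !(predicate (n * d)) then -1
  else bsearchA predicate (PySem.Int.floordiv d 2) (n * d) (-1)

-- ===== PORT B =====
def prefixesB (acc : Int × Int) : List (Int × Int) → List (Int × Int)
  | [] => [acc]
  | p :: rest => acc :: prefixesB (acc.1 + p.1, acc.2 + p.2) rest

def bsearchB (p : Int → Bool) (low high : Int) : Int :=
  if h : low ≤ high then
    let mid := PySem.Int.floordiv (low + high) 2
    if p mid then
      let r := bsearchB p low (mid - 1)
      if r == -1 then mid else r
    else bsearchB p (mid + 1) high
  else -1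
termination_by (high + 1 - low).toNat
decreasing_by
  · have := PySem.Int.floordiv_two_mid_bounds h; omega
  · have := PySem.Int.floordiv_two_mid_bounds h; omega

def solve_magic_ship_alt (x1 : Int) (y1 : Int) (x2 : Int) (y2 : Int) (D : List (Int × Int)) : Int :=
  let d := |x1 - x2| + |y1 - y2|
  let n : Int := D.length
  let sums := prefixesB (0, 0) D
  let ok : Int → Bool := fun k =>
    let xk := x1 + (PySem.Int.floordiv k n) * ((PySem.List.pyGet? sums n).getD (0, 0)).1
                 + ((PySem.List.pyGet? sums (PySem.Int.mod k n)).getD (0, 0)).1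
    let yk := y1 + (PySem.Int.floordiv k n) * ((PySem.List.pyGet? sums n).getD (0, 0)).2
                 + ((PySem.List.pyGet? sums (PySem.Int.mod k n)).getD (0, 0)).2
    decide (|xk - x2| + |yk - y2| ≤ k)
  if !(ok (n * d)) then -1
  else bsearchB ok (PySem.Int.floordiv d 2) (n * d)

-- ===== PRECONDITION & SPEC =====
-- Pre_ excludes the empty wind list, on which the Python A raises ZeroDivisionError (k % n).
def Pre_solve_magic_ship (x1 : Int) (y1 : Int) (x2 : Int) (y2 : Int) (D : List (Int × Int)) : Prop := D ≠ []
instance (x1 : Int) (y1 : Int) (x2 : Int) (y2 : Int) (D : List (Int × Int)) : Decidable (Pre_solve_magic_ship x1 y1 x2 y2 D) := by unfold Pre_solve_magic_ship; infer_instance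
def pvWitness_solve_magic_ship : Int × Int × Int × Int × (List (Int × Int)) := (0, 0, 3, 1, [(1, 0), (0, -1)])

def Spec_solve_magic_ship (x1 : Int) (y1 : Int) (x2 : Int) (y2 : Int) (D : List (Int × Int)) (out : Int) : Prop := out = solve_magic_ship_alt x1 y1 x2 y2 D
instance (x1 : Int) (y1 : Int) (x2 : Int) (y2 : Int) (D : List (Int × Int)) (out : Int) : Decidable (Spec_solve_magic_ship x1 y1 x2 y2 D out) := by unfold Spec_solve_magic_ship; infer_instance

-- ===== CLAIM (what is proved, stated in full; the proofs are below) =====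
def Claim_equal_solve_magic_ship : Prop := ∀ (x1 : Int) (y1 : Int) (x2 : Int) (y2 : Int) (D : List (Int × Int)), Dom_solve_magic_ship x1 y1 x2 y2 D → Pre_solve_magic_ship x1 y1 x2 y2 D → Spec_solve_magic_ship x1 y1 x2 y2 D (solve_magic_ship x1 y1 x2 y2 D)

-- ===== LEMMAS AND PROOFS =====

/-- A's append-to-last loop equals B's structural recursion, generalized over an
already-built prefix `pre` and the running accumulator `acc` (= last element). -/
theorem sumsA_foldl_eq (D : List (Int × Int)) :
    ∀ (pre : List (Int × Int)) (acc : Int × Int),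
      D.foldl (fun s p => s ++ [(p.1 + (pyLastA s).1, p.2 + (pyLastA s).2)]) (pre ++ [acc])
        = pre ++ prefixesB acc D := by
  induction D with
  | nil => intro pre acc; simp [prefixesB]
  | cons p rest ih =>
      intro pre acc
      have hlast : pyLastA (pre ++ [acc]) = acc := by
        simp [pyLastA, PySem.List.pyGet?_neg_one_append_singleton]
      simp only [List.foldl_cons, hlast, prefixesB]
      have : (pre ++ [acc]) ++ [(p.1 + acc.1, p.2 + acc.2)]
           = (pre ++ [acc]) ++ [(acc.1 + p.1, acc.2 + p.2)] := by ring_nf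
      rw [this, ih (pre ++ [acc]) (acc.1 + p.1, acc.2 + p.2)]
      simp

theorem sumsA_eq (D : List (Int × Int)) : sumsA D = prefixesB (0, 0) D := by
  have := sumsA_foldl_eq D [] (0, 0)
  simpa [sumsA] using this

/-- bsearchB returns -1 or a value ≥ low. -/
theorem bsearchB_ge (p : Int → Bool) (low high : Int) :
    bsearchB p low high = -1 ∨ low ≤ bsearchB p low high := by
  rw [bsearchB]
  by_cases h : low ≤ high
  · have hm := PySem.Int.floordiv_two_mid_bounds h
    rw [dif_pos h]
    set mid := PySem.Int.floordiv (low + high) 2 with hmid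
    by_cases hp : p mid = true
    · rw [if_pos hp]
      rcases bsearchB_ge p low (mid - 1) with h1 | h1
      · simp only [h1]; right; simp; omega
      · by_cases h2 : bsearchB p low (mid - 1) = -1
        · simp only [h2]; right; simp; omega
        · simp only [beq_iff_eq, if_neg h2]; right; exact h1
    · rw [if_neg hp]
      rcases bsearchB_ge p (mid + 1) high with h1 | h1
      · left; exact h1
      · right; omega
  · rw [dif_neg h]; left; rfl
termination_by (high + 1 - low).toNat
decreasing_by
  · have := PySem.Int.floordiv_two_mid_bounds h; omega
  · have := PySem.Int.floordiv_two_mid_bounds h; omega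

/-- A's accumulator binary search equals B's recursive search with the accumulator
as fallback, provided low is nonnegative (so no probed midpoint is -1). -/
theorem bsearchA_eq (p : Int → Bool) (low high : Int) :
    ∀ sol : Int, 0 ≤ low →
      bsearchA p low high sol = (if bsearchB p low high = -1 then sol else bsearchB p low high) := by
  intro sol hlow
  rw [bsearchA, bsearchB]
  by_cases h : low ≤ high
  · have hm := PySem.Int.floordiv_two_mid_bounds h
    rw [dif_pos h, dif_pos h]
    set mid := PySem.Int.floordiv (low + high) 2 with hmid
    by_cases hp : p mid = true
    · rw [if_pos hp, if_pos hp]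
      have ih := bsearchA_eq p low (mid - 1) mid hlow
      rcases bsearchB_ge p low (mid - 1) with h1 | h1
      · rw [ih, if_pos h1]
        simp only [h1]
        rw [if_pos (by decide : ((-1 : Int) == -1) = true)]
        rw [if_neg (by omega : ¬ mid = -1)]
      · have hne : bsearchB p low (mid - 1) ≠ -1 := by omega
        rw [ih, if_neg hne]
        simp only [beq_iff_eq, if_neg hne]
    · rw [if_neg hp, if_neg hp]
      exact bsearchA_eq p (mid + 1) high sol (by omega)
  · rw [dif_neg h, dif_neg h]
    rw [if_pos rfl]
termination_by (high + 1 - low).toNat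
decreasing_by
  · have := PySem.Int.floordiv_two_mid_bounds h; omega
  · have := PySem.Int.floordiv_two_mid_bounds h; omega

-- ===== VERDICT (by name: the statement is the Claim_ definition above) =====
theorem solve_magic_ship_spec : Claim_equal_solve_magic_ship := by
  intro x1 y1 x2 y2 D _ _
  unfold Spec_solve_magic_ship solve_magic_ship solve_magic_ship_alt
  simp only [sumsA_eq, manhattanA, pyIdxA]
  set d := |x1 - x2| + |y1 - y2| with hd
  have hlow : (0:Int) ≤ PySem.Int.floordiv d 2 := by
    have : (0:Int) ≤ d := by positivity
    have := (PySem.Int.le_floordiv_iff_mul_le (a := d) (b := 2) (q := 0) (by omega)).mpr (by omega)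
    exact this
  split
  · rfl
  · rw [bsearchA_eq _ _ _ (-1) hlow]
    split <;> omega
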